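-- pv_equiv track=rewrite | github.com/naydichev/advent-of-code-solutions | 2018/18/puzzle_2.py | resource_value
-- ===== SOURCE A (Python) =====
-- TREES = "|"
--
-- LUMBERYARD = "#"
--
-- def resource_value(forest):
--     trees = 0
--     lumberyard = 0
--     for c in forest:
--         if c == TREES:
--             trees += 1
--         elif c == LUMBERYARD:
--             lumberyard += 1
--
--     return trees * lumberyard
-- ===== SOURCE B (Python) =====
-- from collections import Counter
--
-- TREES = "|"
--
-- LUMBERYARD = "#"
--
-- def resource_value(forest):
--     counts = Counter(forest)
--     return counts[TREES] * counts[LUMBERYARD]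
-- ===== Notes on version B (the rewrite author's own statement) =====
-- stated objective: idiomatic
-- what changed: Replaces the two guarded integer accumulators and per-character branching with a single Counter histogram built in one pass, then two default-0 lookups multiplied.
import Mathlib
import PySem

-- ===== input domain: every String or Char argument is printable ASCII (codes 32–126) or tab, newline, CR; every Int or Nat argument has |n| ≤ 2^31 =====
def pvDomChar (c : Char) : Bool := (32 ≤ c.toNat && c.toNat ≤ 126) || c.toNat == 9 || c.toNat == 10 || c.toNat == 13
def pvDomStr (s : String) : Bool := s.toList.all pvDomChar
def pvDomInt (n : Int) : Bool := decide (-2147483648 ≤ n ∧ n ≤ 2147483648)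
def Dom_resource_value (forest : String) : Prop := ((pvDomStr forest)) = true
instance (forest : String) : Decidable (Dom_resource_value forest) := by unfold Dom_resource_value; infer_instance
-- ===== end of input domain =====

-- B replaces A's two guarded accumulators with a single Counter histogram plus two default-0 lookups (idiomatic, same cost).


-- ===== PORT A =====
-- Port A: fold over the characters with two counters, branching per character.
def pvStepA (p : Int × Int) (c : Char) : Int × Int :=
  if c == '|' then (p.1 + 1, p.2)
  else if c == '#' then (p.1, p.2 + 1)
  else p

def resource_value (forest : String) : Int :=
  let st := forest.toList.foldl pvStepA (0, 0)
  st.1 * st.2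

-- ===== PORT B =====
-- Port B: build a full character histogram (Counter) once, then two default-0 lookups.
def resource_value_alt (forest : String) : Int :=
  let counts := PySem.Dict.counter forest.toList
  counts.getD '|' 0 * counts.getD '#' 0

-- ===== PRECONDITION & SPEC =====
def Spec_resource_value (forest : String) (out : Int) : Prop := out = resource_value_alt forest
instance (forest : String) (out : Int) : Decidable (Spec_resource_value forest out) := by unfold Spec_resource_value; infer_instance

-- ===== CLAIM (what is proved, stated in full; the proofs are below) =====
def Claim_equal_resource_value : Prop := ∀ (forest : String), Dom_resource_value forest → Spec_resource_value forest (resource_value forest)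

-- ===== LEMMAS AND PROOFS =====

-- ===== VERDICT (by name: the statement is the Claim_ definition above) =====
theorem pv_foldl_counts (l : List Char) (t y : Int) :
    l.foldl pvStepA (t, y) = (t + l.count '|', y + l.count '#') := by
  induction l generalizing t y with
  | nil => simp
  | cons c l ih =>
    rw [List.foldl_cons]
    by_cases h1 : c = '|'
    · subst h1
      rw [show pvStepA (t, y) '|' = (t + 1, y) from rfl, ih, Prod.ext_iff]
      simp
      omega
    · by_cases h2 : c = '#'
      · subst h2
        rw [show pvStepA (t, y) '#' = (t, y + 1) from rfl, ih, Prod.ext_iff]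
        simp [List.count_cons, Ne.symm h1]
        omega
      · rw [show pvStepA (t, y) c = (t, y) by simp [pvStepA, h1, h2], ih, Prod.ext_iff]
        simp [List.count_cons, Ne.symm h1, Ne.symm h2]
        exact ⟨h1, h2⟩

theorem resource_value_spec : Claim_equal_resource_value := by
  intro forest _
  unfold Spec_resource_value resource_value resource_value_alt
  rw [pv_foldl_counts]
  simp [PySem.Dict.getD_counter]
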